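-- pv_equiv track=rewrite | github.com/vibhor1102/busy-whatsapp-bridge | app/services/reminder_service.py | _chunk_report_lines
-- ===== SOURCE A (Python) =====
-- from typing import List, Optional, Dict, Any
--
-- def _chunk_report_lines(lines: List[str], max_chars: int = 3500) -> List[str]:
--     chunks: List[str] = []
--     current: List[str] = []
--     current_len = 0
--     for line in lines:
--         add_len = len(line) + 1
--         if current and current_len + add_len > max_chars:
--             chunks.append("\n".join(current))
--             current = [line]
--             current_len = add_len
--         else:
--             current.append(line)
--             current_len += add_len
--     if current:
--         chunks.append("\n".join(current))
--     return chunks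
-- ===== SOURCE B (Python) =====
-- from typing import List
--
-- def _bisect_right(a: List[int], x: int, lo: int, hi: int) -> int:
--     # rightmost insertion point for x in the sorted list a[lo:hi]
--     while lo < hi:
--         mid = (lo + hi) // 2
--         if a[mid] <= x:
--             lo = mid + 1
--         else:
--             hi = mid
--     return lo
--
-- def _next_break(prefix: List[int], max_chars: int, s: int) -> int:
--     # largest e with prefix[e] - prefix[s] <= max_chars, but at least s + 1
--     r = _bisect_right(prefix, prefix[s] + max_chars, 0, len(prefix))
--     e = r - 1
--     return s + 1 if e <= s else e
--
-- def _chunk_report_lines(lines: List[str], max_chars: int = 3500) -> List[str]: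
--     # prefix[i] = sum of len(line)+1 over the first i lines
--     prefix = [0]
--     total = 0
--     for line in lines:
--         total += len(line) + 1
--         prefix.append(total)
--     chunks: List[str] = []
--     s = 0
--     while s < len(lines):
--         e = _next_break(prefix, max_chars, s)
--         chunks.append("\n".join(lines[s:e]))
--         s = e
--     return chunks
-- ===== Notes on version B (the rewrite author's own statement) =====
-- stated objective: alternative
-- what changed: Replaced A's single line-by-line greedy pass that accumulates the current chunk by a prefix-sum + binary-search algorithm: build prefix sums of len(line)+1 once, then jump from chunk start to chunk start, finding each chunk's end with a hand-written bisect_right on the prefix sums (clamped to at least one line per chunk), and slice-and-join each chunk.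
import Mathlib
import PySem

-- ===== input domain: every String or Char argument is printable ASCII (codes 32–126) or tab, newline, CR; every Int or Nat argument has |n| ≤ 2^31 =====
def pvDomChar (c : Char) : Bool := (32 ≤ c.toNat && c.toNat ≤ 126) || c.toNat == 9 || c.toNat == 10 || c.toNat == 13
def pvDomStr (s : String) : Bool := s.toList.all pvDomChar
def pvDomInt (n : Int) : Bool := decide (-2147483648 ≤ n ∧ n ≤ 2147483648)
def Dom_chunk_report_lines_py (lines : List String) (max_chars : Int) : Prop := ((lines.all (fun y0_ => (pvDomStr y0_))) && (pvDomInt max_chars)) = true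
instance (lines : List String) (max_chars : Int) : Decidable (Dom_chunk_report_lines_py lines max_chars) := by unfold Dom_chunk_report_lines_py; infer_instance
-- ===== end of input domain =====

-- B replaces A's line-by-line greedy accumulation by prefix sums + hand-written binary search
-- jumping from chunk start to chunk start; same results, alternative algorithm (no speed claim).

-- ===== PORT A =====
-- A's loop body (state = (chunks, current, current_len))
def stepA (max_chars : Int) (st : List String × List String × Int) (line : String) :
    List String × List String × Int :=
  let (chunks, current, current_len) := st
  let add_len : Int := PySem.Str.len line + 1
  if current ≠ [] ∧ current_len + add_len > max_chars then
    (chunks ++ [PySem.Str.join "\n" current], [line], add_len)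
  else
    (chunks, current ++ [line], current_len + add_len)

-- A's trailing 'if current: chunks.append(...)'
def finishA (st : List String × List String × Int) : List String :=
  if st.2.1 ≠ [] then st.1 ++ [PySem.Str.join "\n" st.2.1] else st.1

def chunk_report_lines_py (lines : List String) (max_chars : Int) : List String :=
  finishA (lines.foldl (stepA max_chars) ([], [], 0))

-- ===== PORT B =====
-- B-side helper: _bisect_right's while-loop as the obvious recursion on hi - lo
-- (a[mid] ported as getD: inside the loop 0 ≤ lo ≤ mid < hi ≤ len(a), so the index is in range)
def bisectR (a : List Int) (x : Int) (lo hi : Nat) : Nat :=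
  if _h : lo < hi then
    if a.getD ((lo + hi) / 2) 0 ≤ x then bisectR a x ((lo + hi) / 2 + 1) hi
    else bisectR a x lo ((lo + hi) / 2)
  else lo
termination_by hi - lo
decreasing_by all_goals omega

-- B-side helper: _next_break (Python's e = r - 1 may be -1; in Nat, r - 1 = 0 ≤ s clamps the same)
def nextBreak (pfx : List Int) (max_chars : Int) (s : Nat) : Nat :=
  if bisectR pfx (pfx.getD s 0 + max_chars) 0 pfx.length - 1 ≤ s then s + 1
  else bisectR pfx (pfx.getD s 0 + max_chars) 0 pfx.length - 1

lemma nextBreak_gt (pfx : List Int) (max_chars : Int) (s : Nat) :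
    s < nextBreak pfx max_chars s := by
  unfold nextBreak
  split <;> omega

-- B-side helper: the prefix-building loop (state = (prefix, total))
def prefixStep (st : List Int × Int) (line : String) : List Int × Int :=
  (st.1 ++ [st.2 + PySem.Str.len line + 1], st.2 + PySem.Str.len line + 1)

def prefixSums (lines : List String) : List Int :=
  (lines.foldl prefixStep ([0], 0)).1

-- B-side helper: the chunk-emitting while-loop as recursion on the start index
def chunkFrom (lines : List String) (pfx : List Int) (max_chars : Int) (s : Nat) : List String :=
  if _h : s < lines.length then
    PySem.Str.join "\n"
        (PySem.List.slice lines (some (s : Int)) (some ((nextBreak pfx max_chars s : Nat) : Int))) ::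
      chunkFrom lines pfx max_chars (nextBreak pfx max_chars s)
  else []
termination_by lines.length - s
decreasing_by have := nextBreak_gt pfx max_chars s; omega

def chunk_report_lines_py_alt (lines : List String) (max_chars : Int) : List String :=
  chunkFrom lines (prefixSums lines) max_chars 0

-- ===== PRECONDITION & SPEC =====
def Spec_chunk_report_lines_py (lines : List String) (max_chars : Int) (out : List String) : Prop := out = chunk_report_lines_py_alt lines max_chars
instance (lines : List String) (max_chars : Int) (out : List String) : Decidable (Spec_chunk_report_lines_py lines max_chars out) := by unfold Spec_chunk_report_lines_py; infer_instance

-- ===== CLAIM (what is proved, stated in full; the proofs are below) =====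
def Claim_equal_chunk_report_lines_py : Prop := ∀ (lines : List String) (max_chars : Int), Dom_chunk_report_lines_py lines max_chars → Spec_chunk_report_lines_py lines max_chars (chunk_report_lines_py lines max_chars)

-- ===== LEMMAS AND PROOFS =====

-- the mathematical prefix sum: Psum lines i = sum over the first i lines of len+1
def Psum (lines : List String) (i : Nat) : Int :=
  ((lines.take i).map (fun l => PySem.Str.len l + 1)).sum

lemma Psum_zero (lines : List String) : Psum lines 0 = 0 := rfl

lemma Psum_succ (lines : List String) (i : Nat) (h : i < lines.length) :
    Psum lines (i + 1) = Psum lines i + (PySem.Str.len lines[i] + 1) := by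
  unfold Psum
  simp only [List.map_take]
  rw [List.take_add_one, List.getElem?_map, List.getElem?_eq_getElem h]
  simp

lemma Psum_mono (lines : List String) {i j : Nat} (hij : i ≤ j) (hj : j ≤ lines.length) :
    Psum lines i ≤ Psum lines j := by
  induction j with
  | zero =>
    have h0 : i = 0 := by omega
    subst h0
    exact le_rfl
  | succ j ih =>
    rcases Nat.lt_or_ge i (j + 1) with hlt | hge
    · have h1 : Psum lines i ≤ Psum lines j := ih (by omega) (by omega)
      have h2 := Psum_succ lines j (by omega)
      have h3 : (0:Int) ≤ PySem.Str.len lines[j] := by simp [PySem.Str.len_eq]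
      omega
    · have h0 : i = j + 1 := by omega
      subst h0
      exact le_rfl

-- structural description of the prefix list built by the fold
def psum : List String → Int → List Int
  | [], t => [t]
  | l :: ls, t => t :: psum ls (t + PySem.Str.len l + 1)

lemma foldl_prefixStep (ls : List String) :
    ∀ (acc : List Int) (t : Int), (ls.foldl prefixStep (acc ++ [t], t)).1 = acc ++ psum ls t := by
  induction ls with
  | nil => intro acc t; simp [psum]
  | cons l ls ih =>
    intro acc t
    have h1 : prefixStep (acc ++ [t], t) l
        = ((acc ++ [t]) ++ [t + PySem.Str.len l + 1], t + PySem.Str.len l + 1) := rfl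
    simp only [List.foldl_cons, h1, ih (acc ++ [t]) (t + PySem.Str.len l + 1), psum]
    simp

lemma prefixSums_eq_psum (lines : List String) : prefixSums lines = psum lines 0 := by
  have := foldl_prefixStep lines [] 0
  simpa [prefixSums] using this

lemma psum_length (ls : List String) : ∀ t, (psum ls t).length = ls.length + 1 := by
  induction ls with
  | nil => intro t; rfl
  | cons l ls ih => intro t; simp [psum, ih]

lemma psum_getD (ls : List String) :
    ∀ (t : Int) (i : Nat), i ≤ ls.length → (psum ls t).getD i 0 = t + Psum ls i := by
  induction ls with
  | nil =>
    intro t i hi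
    simp only [List.length_nil] at hi
    have h0 : i = 0 := by omega
    subst h0
    simp [psum, Psum]
  | cons l ls ih =>
    intro t i hi
    cases i with
    | zero => simp [psum, Psum]
    | succ i =>
      have h1 : Psum (l :: ls) (i + 1) = (PySem.Str.len l + 1) + Psum ls i := by
        unfold Psum
        simp [List.take_succ_cons]
      simp only [psum, List.getD_cons_succ]
      rw [ih (t + PySem.Str.len l + 1) i (by simpa using hi), h1]
      ring

lemma pfx_length (lines : List String) : (prefixSums lines).length = lines.length + 1 := by
  rw [prefixSums_eq_psum]; exact psum_length lines 0

lemma pfx_getD (lines : List String) (i : Nat) (hi : i ≤ lines.length) :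
    (prefixSums lines).getD i 0 = Psum lines i := by
  rw [prefixSums_eq_psum, psum_getD lines 0 i hi]; ring

-- invariant characterisation of the binary search: below the result the test holds, from it on it fails
lemma bisectR_inv (a : List Int) (x : Int)
    (hmono : ∀ i j : Nat, i ≤ j → j < a.length → a.getD j 0 ≤ x → a.getD i 0 ≤ x) :
    ∀ (d lo hi : Nat), hi - lo ≤ d → lo ≤ hi → hi ≤ a.length →
      lo ≤ bisectR a x lo hi ∧ bisectR a x lo hi ≤ hi ∧
      (∀ j, lo ≤ j → j < bisectR a x lo hi → a.getD j 0 ≤ x) ∧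
      (∀ j, bisectR a x lo hi ≤ j → j < hi → ¬ a.getD j 0 ≤ x) := by
  intro d
  induction d with
  | zero =>
    intro lo hi hd hlh _
    have he : lo = hi := by omega
    subst he
    rw [bisectR, dif_neg (by omega)]
    exact ⟨le_rfl, le_rfl, fun j h1 h2 => absurd h2 (by omega),
      fun j h1 h2 => absurd h2 (by omega)⟩
  | succ d ih =>
    intro lo hi hd hlh hha
    rw [bisectR]
    by_cases h : lo < hi
    · rw [dif_pos h]
      have hmid1 : lo ≤ (lo + hi) / 2 := by omega
      have hmid2 : (lo + hi) / 2 < hi := by omega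
      by_cases ht : a.getD ((lo + hi) / 2) 0 ≤ x
      · rw [if_pos ht]
        obtain ⟨r1, r2, r3, r4⟩ := ih ((lo + hi) / 2 + 1) hi (by omega) (by omega) hha
        refine ⟨by omega, r2, ?_, r4⟩
        intro j hj1 hj2
        rcases Nat.lt_or_ge j ((lo + hi) / 2 + 1) with hlt | hge
        · exact hmono j ((lo + hi) / 2) (by omega) (by omega) ht
        · exact r3 j hge hj2
      · rw [if_neg ht]
        obtain ⟨r1, r2, r3, r4⟩ := ih lo ((lo + hi) / 2) (by omega) (by omega) (by omega)
        refine ⟨r1, by omega, r3, ?_⟩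
        intro j hj1 hj2
        rcases Nat.lt_or_ge j ((lo + hi) / 2) with hlt | hge
        · exact r4 j hj1 hlt
        · intro hjx
          exact ht (hmono ((lo + hi) / 2) j hge (by omega) hjx)
    · rw [dif_neg h]
      exact ⟨le_rfl, by omega, fun j h1 h2 => absurd h2 (by omega),
        fun j h1 h2 => absurd h2 (by omega)⟩

-- the break point B jumps to equals the index i at which A's greedy loop closes the chunk
lemma nextBreak_eq (lines : List String) (max_chars : Int) (s i : Nat)
    (hsi : s < i) (hin : i ≤ lines.length)
    (hfit : ∀ j, s + 2 ≤ j → j ≤ i → Psum lines j - Psum lines s ≤ max_chars)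
    (hbreak : i = lines.length ∨
      (i < lines.length ∧ Psum lines (i + 1) - Psum lines s > max_chars)) :
    nextBreak (prefixSums lines) max_chars s = i := by
  have hlen := pfx_length lines
  have hmono : ∀ p q : Nat, p ≤ q → q < (prefixSums lines).length →
      (prefixSums lines).getD q 0 ≤ Psum lines s + max_chars →
      (prefixSums lines).getD p 0 ≤ Psum lines s + max_chars := by
    intro p q hpq hq hqle
    rw [pfx_getD lines q (by omega)] at hqle
    rw [pfx_getD lines p (by omega)]
    have := Psum_mono lines hpq (show q ≤ lines.length by omega)
    omega
  unfold nextBreak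
  rw [pfx_getD lines s (by omega)]
  obtain ⟨r1, r2, r3, r4⟩ := bisectR_inv (prefixSums lines) (Psum lines s + max_chars) hmono
    (prefixSums lines).length 0 (prefixSums lines).length (by omega) (by omega) le_rfl
  set r := bisectR (prefixSums lines) (Psum lines s + max_chars) 0 (prefixSums lines).length with hr
  -- upper bound: r ≤ i + 1
  have hub : r ≤ i + 1 := by
    rcases hbreak with hB | ⟨hB1, hB2⟩
    · omega
    · by_contra hgt
      have := r3 (i + 1) (by omega) (by omega)
      rw [pfx_getD lines (i + 1) (by omega)] at this
      omega
  by_cases hc : i = s + 1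
  · -- either the clamp fires or r - 1 = s + 1; both give i
    subst hc
    split <;> omega
  · -- i ≥ s + 2 : Psum i fits, so r ≥ i + 1, hence r = i + 1 and no clamp
    have hge2 : s + 2 ≤ i := by omega
    have hfi : (prefixSums lines).getD i 0 ≤ Psum lines s + max_chars := by
      rw [pfx_getD lines i (by omega)]
      have := hfit i hge2 le_rfl
      omega
    have hlb : i + 1 ≤ r := by
      by_contra hlt
      exact r4 i (by omega) (by omega) hfi
    rw [if_neg (by omega)]
    omega

lemma chunkFrom_nil (lines : List String) (pfx : List Int) (max_chars : Int) (s : Nat)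
    (h : ¬ s < lines.length) : chunkFrom lines pfx max_chars s = [] := by
  rw [chunkFrom, dif_neg h]

lemma chunkFrom_step (lines : List String) (max_chars : Int) (s i : Nat)
    (hsi : s < i) (hin : i ≤ lines.length)
    (hfit : ∀ j, s + 2 ≤ j → j ≤ i → Psum lines j - Psum lines s ≤ max_chars)
    (hbreak : i = lines.length ∨
      (i < lines.length ∧ Psum lines (i + 1) - Psum lines s > max_chars)) :
    chunkFrom lines (prefixSums lines) max_chars s
      = PySem.Str.join "\n" ((lines.drop s).take (i - s)) ::
          chunkFrom lines (prefixSums lines) max_chars i := by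
  rw [chunkFrom, dif_pos (show s < lines.length by omega)]
  rw [nextBreak_eq lines max_chars s i hsi hin hfit hbreak]
  rw [PySem.List.slice_natCast]

-- main loop invariant: A's fold, started with current = lines[s:i] and its length sum,
-- finishes as the accumulated chunks followed by B's chunkFrom s
lemma chunk_loop_eq (max_chars : Int) (lines : List String) :
    ∀ (rest : List String) (i : Nat), lines.drop i = rest → i ≤ lines.length →
    ∀ (s : Nat), s ≤ i →
    (∀ j, s + 2 ≤ j → j ≤ i → Psum lines j - Psum lines s ≤ max_chars) →
    ∀ (C : List String),
    finishA (rest.foldl (stepA max_chars)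
        (C, (lines.drop s).take (i - s), Psum lines i - Psum lines s))
    = C ++ chunkFrom lines (prefixSums lines) max_chars s := by
  intro rest
  induction rest with
  | nil =>
    intro i hdrop hi s hs hfit C
    have hieq : i = lines.length := by
      have := List.drop_eq_nil_iff.mp hdrop; omega
    subst hieq
    simp only [List.foldl_nil, finishA]
    by_cases hlt : s < lines.length
    · have hcur : (lines.drop s).take (lines.length - s) = lines.drop s := by
        apply List.take_of_length_le; simp
      have hne : (lines.drop s).take (lines.length - s) ≠ [] := by
        rw [hcur, ne_eq, List.drop_eq_nil_iff]; omega
      rw [if_pos hne]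
      rw [chunkFrom_step lines max_chars s lines.length hlt le_rfl hfit (Or.inl rfl)]
      rw [chunkFrom_nil lines _ max_chars lines.length (by omega)]
    · have hnil : (lines.drop s).take (lines.length - s) = [] := by
        rw [List.drop_eq_nil_iff.mpr (by omega)]; simp
      rw [hnil, if_neg (by simp), chunkFrom_nil lines _ max_chars s hlt]
      simp
  | cons line rest' ih =>
    intro i hdrop hi s hs hfit C
    have hilt : i < lines.length := by
      by_contra h
      have : lines.drop i = [] := List.drop_eq_nil_iff.mpr (by omega)
      rw [this] at hdrop; simp at hdrop
    have hdrop' : lines.drop (i + 1) = rest' := by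
      have := congrArg List.tail hdrop
      simpa [List.tail_drop] using this
    have hline : lines[i] = line := by
      have := List.drop_eq_getElem_cons hilt
      rw [hdrop] at this
      exact (List.cons.injEq _ _ _ _ ▸ this).1.symm
    have hadd : PySem.Str.len line + 1 = Psum lines (i + 1) - Psum lines i := by
      have := Psum_succ lines i hilt
      rw [hline] at this
      omega
    have hcurlen : ((lines.drop s).take (i - s)).length = i - s := by
      simp; omega
    have hcur_ne : (lines.drop s).take (i - s) ≠ [] ↔ s < i := by
      rw [← List.length_pos_iff, hcurlen]; omega
    have hcur_succ : (lines.drop s).take (i + 1 - s) = (lines.drop s).take (i - s) ++ [line] := by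
      have h1 : i + 1 - s = (i - s) + 1 := by omega
      rw [h1, List.take_add_one]
      have : (lines.drop s)[i - s]? = some line := by
        rw [List.getElem?_drop]
        have hsi2 : s + (i - s) = i := by omega
        rw [hsi2, List.getElem?_eq_getElem hilt, hline]
      simp [this]
    simp only [List.foldl_cons, stepA]
    by_cases hc : s < i ∧ Psum lines i - Psum lines s + (PySem.Str.len line + 1) > max_chars
    · have hA : (lines.drop s).take (i - s) ≠ [] ∧
          Psum lines i - Psum lines s + (PySem.Str.len line + 1) > max_chars :=
        ⟨hcur_ne.mpr hc.1, hc.2⟩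
      rw [if_pos hA]
      have hnext := ih (i + 1) hdrop' (by omega) i (by omega)
        (by intro j hj1 hj2; omega) (C ++ [PySem.Str.join "\n" ((lines.drop s).take (i - s))])
      have hcur1 : (lines.drop i).take (i + 1 - i) = [line] := by
        rw [hdrop]; simp
      rw [hcur1, ← hadd] at hnext
      have hadd2 : Psum lines i - Psum lines i + (PySem.Str.len line + 1)
          = PySem.Str.len line + 1 := by ring
      rw [chunkFrom_step lines max_chars s i hc.1 (by omega) hfit
        (Or.inr ⟨hilt, by omega⟩)]
      rw [show (C ++ (PySem.Str.join "\n" ((lines.drop s).take (i - s)) ::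
          chunkFrom lines (prefixSums lines) max_chars i))
          = (C ++ [PySem.Str.join "\n" ((lines.drop s).take (i - s))])
              ++ chunkFrom lines (prefixSums lines) max_chars i from by simp]
      exact hnext
    · have hA : ¬ ((lines.drop s).take (i - s) ≠ [] ∧
          Psum lines i - Psum lines s + (PySem.Str.len line + 1) > max_chars) := by
        rw [hcur_ne]; exact hc
      rw [if_neg hA]
      have hfit' : ∀ j, s + 2 ≤ j → j ≤ i + 1 → Psum lines j - Psum lines s ≤ max_chars := by
        intro j hj1 hj2
        rcases Nat.lt_or_ge j (i + 1) with hlt | hge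
        · exact hfit j hj1 (by omega)
        · have hj : j = i + 1 := by omega
          subst hj
          by_cases hsi2 : s < i
          · have hno : ¬ Psum lines i - Psum lines s + (PySem.Str.len line + 1) > max_chars := by
              intro h; exact hc ⟨hsi2, h⟩
            omega
          · omega
      have hnext := ih (i + 1) hdrop' (by omega) s (by omega) hfit' C
      rw [hcur_succ] at hnext
      rw [show Psum lines i - Psum lines s + (PySem.Str.len line + 1)
          = Psum lines (i + 1) - Psum lines s from by omega]
      exact hnext

-- ===== VERDICT (by name: the statement is the Claim_ definition above) =====
theorem chunk_report_lines_py_spec : Claim_equal_chunk_report_lines_py := by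
  intro lines max_chars _
  unfold Spec_chunk_report_lines_py chunk_report_lines_py chunk_report_lines_py_alt
  have h := chunk_loop_eq max_chars lines lines 0 rfl (Nat.zero_le _) 0 le_rfl
    (by intro j h1 h2; omega) []
  simpa [Psum_zero] using h
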